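-- pv_equiv track=rewrite | github.com/bob686868/Leetcode-100-day-challenge- | day31.py | maxValueOfOrderedTriplet
-- ===== SOURCE A (Python) =====
-- def maxValueOfOrderedTriplet(nums):
--     prefixMax=[nums[0]]
--     postfixMax=[nums[-1]]
--     for i in range(len(nums)-1):
--         postfixMax.append(max(postfixMax[-1],nums[len(nums)-1-i]))
--         prefixMax.append(max(prefixMax[-1],nums[i]))
--     postfixMax.reverse()
--     res=0
--     for i in range(1,len(nums)-1):
--         res=max(res,(prefixMax[i]-nums[i])*postfixMax[i])
--
--     return res
-- ===== SOURCE B (Python) =====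
-- def maxValueOfOrderedTriplet(nums):
--     # Divide and conquer: solve(lo, hi, pre, suf) returns (max(nums[lo:hi]), best)
--     # where best = max over j in [lo, hi) of
--     #   (max(pre, nums[lo..j-1]) - nums[j]) * max(suf, nums[j+1..hi-1]).
--     def solve(lo, hi, pre, suf):
--         if hi - lo == 1:
--             x = nums[lo]
--             return x, (pre - x) * suf
--         mid = (lo + hi) // 2
--         mR, rR = solve(mid, hi, max(pre, max(nums[lo:mid])), suf)
--         mL, rL = solve(lo, mid, pre, max(suf, mR))
--         return max(mL, mR), max(rL, rR)
--
--     n = len(nums)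
--     if n < 3:
--         return 0
--     return max(0, solve(1, n - 1, nums[0], nums[n - 1])[1])
-- ===== Notes on version B (the rewrite author's own statement) =====
-- stated objective: alternative
-- what changed: Replaces A's two staged linear passes (prefix/suffix max arrays plus a second scan) with a recursive divide-and-conquer that splits the index range in half, threads the outside prefix/suffix maxima down as context and merges the halves' best values.
import Mathlib
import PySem

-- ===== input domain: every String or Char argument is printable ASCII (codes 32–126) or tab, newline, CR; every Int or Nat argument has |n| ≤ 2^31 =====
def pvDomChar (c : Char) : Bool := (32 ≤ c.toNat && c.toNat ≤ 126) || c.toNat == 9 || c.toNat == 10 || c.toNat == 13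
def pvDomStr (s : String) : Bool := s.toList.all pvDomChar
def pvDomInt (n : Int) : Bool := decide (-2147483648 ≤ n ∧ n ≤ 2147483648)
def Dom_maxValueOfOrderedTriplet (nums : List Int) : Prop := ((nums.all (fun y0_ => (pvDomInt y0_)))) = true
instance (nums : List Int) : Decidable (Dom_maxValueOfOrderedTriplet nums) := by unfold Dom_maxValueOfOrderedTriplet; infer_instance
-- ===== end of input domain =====

-- B replaces A's two staged linear passes (prefix/suffix max arrays + a second scan) with a
-- recursive divide-and-conquer over the index range that threads the outer prefix/suffix maxima
-- down as context and merges the two halves' best values (alternative decomposition, not faster).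

-- ===== PORT A =====
def maxValueOfOrderedTriplet (nums : List Int) : Int :=
  let n : Int := nums.length
  -- first loop: builds postfixMax and prefixMax by appending (two independent accumulators)
  let st := (PySem.List.pyRange 0 (n - 1) 1).foldl
    (fun (st : List Int × List Int) i =>
      (st.1 ++ [max ((st.1.getLast?).getD 0) (PySem.List.pyGetD nums (n - 1 - i) 0)],
       st.2 ++ [max ((st.2.getLast?).getD 0) (PySem.List.pyGetD nums i 0)]))
    ([PySem.List.pyGetD nums (-1) 0], [PySem.List.pyGetD nums 0 0])
  let postfixMax := st.1.reverse
  let prefixMax := st.2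
  (PySem.List.pyRange 1 (n - 1) 1).foldl
    (fun res i =>
      max res ((PySem.List.pyGetD prefixMax i 0 - PySem.List.pyGetD nums i 0) *
        PySem.List.pyGetD postfixMax i 0)) 0

-- ===== PORT B =====
-- solve(lo, hi, pre, suf) of Source B; termination guard 'hi - lo ≤ 1' coincides with Python's
-- 'hi - lo == 1' on every reachable call (the invariant lo < hi holds throughout).
-- max(nums[lo:mid]) is PySem.List.max? of the slice; '.getD 0' is never taken (slice nonempty).
def solveB (nums : List Int) (lo hi : Nat) (pre suf : Int) : Int × Int :=
  if _h : hi - lo ≤ 1 then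
    let x := PySem.List.pyGetD nums (lo : Int) 0
    (x, (pre - x) * suf)
  else
    let mid := (lo + hi) / 2
    let r := solveB nums mid hi
      (max pre ((PySem.List.max? (PySem.List.slice nums (some (lo : Int)) (some (mid : Int)))
        (fun y => y)).getD 0)) suf
    let l := solveB nums lo mid pre (max suf r.1)
    (max l.1 r.1, max l.2 r.2)
termination_by hi - lo
decreasing_by all_goals omega

def maxValueOfOrderedTriplet_alt (nums : List Int) : Int :=
  let n := nums.length
  if n < 3 then 0
  else
    max 0 (solveB nums 1 (n - 1) (PySem.List.pyGetD nums 0 0)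
      (PySem.List.pyGetD nums ((n : Int) - 1) 0)).2

-- ===== PRECONDITION & SPEC =====
-- A unconditionally indexes the first and last element, raising IndexError on the empty list
-- (B happens to return 0 there, but nothing is claimed outside Pre_).
def Pre_maxValueOfOrderedTriplet (nums : List Int) : Prop := nums ≠ []
instance (nums : List Int) : Decidable (Pre_maxValueOfOrderedTriplet nums) := by
  unfold Pre_maxValueOfOrderedTriplet; infer_instance

def pvWitness_maxValueOfOrderedTriplet : List Int := [2, 7, 1, 6, -3]

def Spec_maxValueOfOrderedTriplet (nums : List Int) (out : Int) : Prop :=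
  out = maxValueOfOrderedTriplet_alt nums
instance (nums : List Int) (out : Int) : Decidable (Spec_maxValueOfOrderedTriplet nums out) := by
  unfold Spec_maxValueOfOrderedTriplet; infer_instance

-- ===== CLAIM (what is proved, stated in full; the proofs are below) =====
def Claim_equal_maxValueOfOrderedTriplet : Prop :=
  ∀ (nums : List Int), Dom_maxValueOfOrderedTriplet nums →
    Pre_maxValueOfOrderedTriplet nums →
    Spec_maxValueOfOrderedTriplet nums (maxValueOfOrderedTriplet nums)

-- ===== LEMMAS AND PROOFS =====

-- running maximum: scanM h c k = max(c, h 0, …, h (k-1))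
def scanM (h : Int → Int) (c : Int) : Nat → Int
  | 0 => c
  | k + 1 => max (scanM h c k) (h (k : Int))

-- the scans implicit in A's two append loops
def gI (nums : List Int) (i : Int) : Int := PySem.List.pyGetD nums i 0
def pscan (nums : List Int) : Nat → Int := scanM (gI nums) (gI nums 0)
def qscan (nums : List Int) : Nat → Int :=
  scanM (fun i => gI nums ((nums.length : Int) - 1 - i)) (gI nums (-1))
def rscan (nums : List Int) : Nat → Int :=
  scanM (fun i => gI nums ((nums.length : Int) - 2 - i)) (gI nums ((nums.length : Int) - 1))

-- the common value both programs compute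
def refFold (nums : List Int) : Int :=
  (PySem.List.pyRange 1 ((nums.length : Int) - 1) 1).foldl
    (fun res i =>
      max res ((pscan nums i.toNat - gI nums i) * rscan nums (nums.length - 2 - i.toNat))) 0

lemma gI_nat (nums : List Int) (k : Nat) : gI nums (k : Int) = nums.getD k 0 := by
  simp [gI, PySem.List.pyGetD_natCast]

lemma gI_neg_one (nums : List Int) (h : nums ≠ []) :
    gI nums (-1) = gI nums ((nums.length : Int) - 1) := by
  have hl : 0 < nums.length := List.length_pos_iff.mpr h
  have h1 : ((nums.length : Int) - 1) = ((nums.length - 1 : Nat) : Int) := by omega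
  rw [h1, gI_nat]
  simp [gI, PySem.List.pyGetD, PySem.List.pyGet?_neg_one, List.getLast?_eq_getElem?,
    List.getD_eq_getElem?_getD]

lemma qscan_succ (nums : List Int) (h : nums ≠ []) (k : Nat) :
    qscan nums (k + 1) = rscan nums k := by
  induction k with
  | zero =>
      simp [qscan, rscan, scanM, gI_neg_one nums h]
  | succ k ih =>
      show max (qscan nums (k + 1)) _ = max (rscan nums k) _
      rw [ih]
      congr 1
      push_cast
      ring_nf

-- A's append loop produces the map of the running maximum over List.range
lemma scan_foldl (h : Int → Int) (c : Int) (m : Nat) :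
    (PySem.List.pyRange 0 (m : Int) 1).foldl
      (fun l i => l ++ [max ((l.getLast?).getD 0) (h i)]) [c]
    = (List.range (m + 1)).map (scanM h c) := by
  induction m with
  | zero => simp [PySem.List.pyRange_one_eq_nil (le_refl (0:Int)), scanM]
  | succ m ih =>
      rw [show ((m + 1 : Nat) : Int) = (m : Int) + 1 by push_cast; ring,
        PySem.List.pyRange_one_succ_right (by positivity), List.foldl_append, ih]
      simp only [List.foldl_cons, List.foldl_nil]
      rw [List.range_succ (n := m + 1), List.map_append]
      congr 1
      · simp [List.getLast?_eq_getElem?]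
        rfl

-- characterization of A
lemma A_eq (nums : List Int) (h : nums ≠ []) :
    maxValueOfOrderedTriplet nums = refFold nums := by
  have hl : 0 < nums.length := List.length_pos_iff.mpr h
  have hc : ((nums.length : Int) - 1) = ((nums.length - 1 : Nat) : Int) := by omega
  unfold maxValueOfOrderedTriplet
  simp only []
  rw [PySem.List.foldl_prod_mk
      (f := fun (l : List Int) i => l ++ [max ((l.getLast?).getD 0)
        (PySem.List.pyGetD nums ((nums.length : Int) - 1 - i) 0)])
      (g := fun (l : List Int) i => l ++ [max ((l.getLast?).getD 0)
        (PySem.List.pyGetD nums i 0)])]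
  rw [hc, scan_foldl, scan_foldl]
  rw [show nums.length - 1 + 1 = nums.length by omega]
  rw [refFold, hc]
  dsimp only
  apply PySem.List.foldl_congr_mem
  intro acc i hi
  rw [PySem.List.mem_pyRange_one] at hi
  obtain ⟨hi1, hi2⟩ := hi
  have hk : i = ((i.toNat : Nat) : Int) := by omega
  set k := i.toNat with hkdef
  have hk1 : 1 ≤ k := by omega
  have hk2 : k < nums.length - 1 := by omega
  congr 1
  congr 1
  · congr 1
    rw [hk, PySem.List.pyGetD_natCast, PySem.List.getD_map_range _ _ _ _ (by omega)]
    rfl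
  · -- the reversed postfix list at index i
    rw [hk, PySem.List.pyGetD_natCast, List.getD_eq_getElem?_getD,
      List.getElem?_reverse (by simp; omega)]
    simp only [List.length_map, List.length_range]
    rw [List.getElem?_map, List.getElem?_range (by omega)]
    simp only [Option.map_some, Option.getD_some]
    rw [← hc]
    show qscan nums (nums.length - 1 - k) = _
    have h2 : nums.length - 1 - k = (nums.length - 2 - k) + 1 := by omega
    rw [h2]
    exact qscan_succ nums h (nums.length - 2 - k)

-- ===== B side =====

-- max of a nonempty list (0 on [], never used there)
def maxOf : List Int → Int
  | [] => 0
  | x :: t => t.foldl max x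

def seg (nums : List Int) (lo hi : Nat) : List Int := (nums.drop lo).take (hi - lo)

def termB (nums : List Int) (pre suf : Int) (lo hi j : Nat) : Int :=
  ((seg nums lo j).foldl max pre - nums.getD j 0) * ((seg nums (j + 1) hi).foldl max suf)

def termsB (nums : List Int) (pre suf : Int) (lo hi : Nat) : List Int :=
  (List.range (hi - lo)).map (fun t => termB nums pre suf lo hi (lo + t))

lemma foldl_max_comm (l : List Int) : ∀ (a b : Int), l.foldl max (max a b) = max a (l.foldl max b) := by
  induction l with
  | nil => intro a b; rfl
  | cons x t ih =>
      intro a b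
      simp only [List.foldl_cons, max_assoc]
      exact ih a (max b x)

lemma foldl_max_nonempty (l : List Int) (h : l ≠ []) (c : Int) :
    l.foldl max c = max c (maxOf l) := by
  cases l with
  | nil => exact absurd rfl h
  | cons x t => exact foldl_max_comm t c x

lemma maxOf_append (l1 l2 : List Int) (h1 : l1 ≠ []) (h2 : l2 ≠ []) :
    maxOf (l1 ++ l2) = max (maxOf l1) (maxOf l2) := by
  cases l1 with
  | nil => exact absurd rfl h1
  | cons x t =>
      show (t ++ l2).foldl max x = _
      rw [List.foldl_append]
      exact foldl_max_nonempty l2 h2 _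

lemma seg_ne_nil (nums : List Int) (lo hi : Nat) (h1 : lo < hi) (h2 : lo < nums.length) :
    seg nums lo hi ≠ [] := by
  have : (seg nums lo hi).length = min (hi - lo) (nums.length - lo) := by
    simp [seg]
  intro hc
  rw [hc] at this
  simp at this
  omega

lemma seg_append (nums : List Int) (lo mid hi : Nat) (h1 : lo ≤ mid) (h2 : mid ≤ hi) :
    seg nums lo hi = seg nums lo mid ++ seg nums mid hi := by
  unfold seg
  rw [show hi - lo = (mid - lo) + (hi - mid) by omega, List.take_add]
  congr 2
  rw [List.drop_drop]
  congr 1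
  omega

lemma seg_self (nums : List Int) (lo : Nat) : seg nums lo lo = [] := by
  simp [seg]

lemma seg_single (nums : List Int) (lo : Nat) (h : lo < nums.length) :
    seg nums lo (lo + 1) = [nums.getD lo 0] := by
  unfold seg
  rw [show lo + 1 - lo = 1 by omega, List.drop_eq_getElem_cons h, List.take_succ_cons,
    List.take_zero]
  simp [List.getD_eq_getElem?_getD, List.getElem?_eq_getElem h]

lemma seg_cons (nums : List Int) (lo hi : Nat) (h1 : lo < hi) (h2 : lo < nums.length) :
    seg nums lo hi = nums.getD lo 0 :: seg nums (lo + 1) hi := by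
  rw [seg_append nums lo (lo + 1) hi (by omega) (by omega), seg_single nums lo h2]
  rfl

lemma max?_getD_maxOf (l : List Int) (h : l ≠ []) :
    (PySem.List.max? l (fun y => y)).getD 0 = maxOf l := by
  cases l with
  | nil => exact absurd rfl h
  | cons x t => rw [PySem.List.max?_id_cons]; rfl

-- the divide-and-conquer recursion computes (segment max, max of the per-j terms)
lemma solveB_spec (nums : List Int) :
    ∀ (d lo hi : Nat) (pre suf : Int), hi - lo = d → lo < hi → hi ≤ nums.length →
      solveB nums lo hi pre suf
        = (maxOf (seg nums lo hi), maxOf (termsB nums pre suf lo hi)) := by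
  intro d
  induction d using Nat.strong_induction_on with
  | _ d ih =>
    intro lo hi pre suf hd hlh hhn
    rw [solveB]
    by_cases h1 : hi - lo ≤ 1
    · rw [dif_pos h1]
      have hhi : hi = lo + 1 := by omega
      subst hhi
      have hlon : lo < nums.length := by omega
      show (PySem.List.pyGetD nums (lo : Int) 0,
        (pre - PySem.List.pyGetD nums (lo : Int) 0) * suf) = _
      rw [Prod.mk.injEq]
      refine ⟨?_, ?_⟩
      · rw [seg_single nums lo hlon]
        show PySem.List.pyGetD nums (lo : Int) 0 = nums.getD lo 0
        rw [PySem.List.pyGetD_natCast]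
      · have : termsB nums pre suf lo (lo + 1)
            = [(pre - nums.getD lo 0) * suf] := by
          unfold termsB termB
          simp [seg_self, List.range_succ]
        rw [this, PySem.List.pyGetD_natCast]
        rfl
    · rw [dif_neg h1]
      show (max (solveB nums lo ((lo + hi) / 2) pre
          (max suf (solveB nums ((lo + hi) / 2) hi
            (max pre ((PySem.List.max? (PySem.List.slice nums (some (lo : Int))
              (some (((lo + hi) / 2 : Nat) : Int))) (fun y => y)).getD 0)) suf).1)).1
          (solveB nums ((lo + hi) / 2) hi
            (max pre ((PySem.List.max? (PySem.List.slice nums (some (lo : Int))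
              (some (((lo + hi) / 2 : Nat) : Int))) (fun y => y)).getD 0)) suf).1,
        max (solveB nums lo ((lo + hi) / 2) pre
          (max suf (solveB nums ((lo + hi) / 2) hi
            (max pre ((PySem.List.max? (PySem.List.slice nums (some (lo : Int))
              (some (((lo + hi) / 2 : Nat) : Int))) (fun y => y)).getD 0)) suf).1)).2
          (solveB nums ((lo + hi) / 2) hi
            (max pre ((PySem.List.max? (PySem.List.slice nums (some (lo : Int))
              (some (((lo + hi) / 2 : Nat) : Int))) (fun y => y)).getD 0)) suf).2) = _
      have h2 : 2 ≤ hi - lo := by omega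
      set mid := (lo + hi) / 2 with hmid
      have hlm : lo < mid := by omega
      have hmh : mid < hi := by omega
      have hmn : mid < nums.length := by omega
      have hln : lo < nums.length := by omega
      have hslice : PySem.List.slice nums (some (lo : Int)) (some (mid : Int))
          = seg nums lo mid := by
        rw [PySem.List.slice_natCast]; rfl
      have hsegLM := seg_ne_nil nums lo mid hlm hln
      have hsegMH := seg_ne_nil nums mid hi hmh hmn
      rw [hslice, max?_getD_maxOf _ hsegLM]
      rw [ih (hi - mid) (by omega) mid hi _ suf rfl hmh hhn,
          ih (mid - lo) (by omega) lo mid pre _ rfl hlm (by omega)]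
      rw [Prod.mk.injEq]
      refine ⟨?_, ?_⟩
      · rw [seg_append nums lo mid hi (by omega) (by omega),
          maxOf_append _ _ hsegLM hsegMH]
      · -- the term lists concatenate
        have hterms : termsB nums pre suf lo hi
            = termsB nums pre (max suf (maxOf (seg nums mid hi))) lo mid
              ++ termsB nums (max pre (maxOf (seg nums lo mid))) suf mid hi := by
          unfold termsB
          rw [show hi - lo = (mid - lo) + (hi - mid) by omega, List.range_add,
            List.map_append, List.map_map]
          congr 1
          · apply List.map_congr_left
            intro t ht
            rw [List.mem_range] at ht
            have hj : lo + t < mid := by omega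
            unfold termB
            congr 1
            -- suffix context: seg (j+1) hi = seg (j+1) mid ++ seg mid hi
            rw [seg_append nums (lo + t + 1) mid hi (by omega) (by omega),
              List.foldl_append, foldl_max_nonempty _ hsegMH,
              max_comm suf (maxOf (seg nums mid hi)), foldl_max_comm, max_comm]
          · apply List.map_congr_left
            intro t ht
            rw [List.mem_range] at ht
            show termB nums pre suf lo hi (lo + ((mid - lo) + t))
              = termB nums (max pre (maxOf (seg nums lo mid))) suf mid hi (mid + t)
            rw [show lo + ((mid - lo) + t) = mid + t by omega]
            unfold termB
            congr 2
            -- prefix context: seg lo j = seg lo mid ++ seg mid j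
            rw [seg_append nums lo mid (mid + t) (by omega) (by omega),
              List.foldl_append, foldl_max_nonempty _ hsegLM]
        rw [hterms]
        dsimp only
        exact (maxOf_append _ _ (by unfold termsB; simp; omega)
          (by unfold termsB; simp; omega)).symm

lemma pscan_eq (nums : List Int) :
    ∀ (j : Nat), 1 ≤ j → j ≤ nums.length →
      pscan nums j = (seg nums 1 j).foldl max (gI nums 0) := by
  intro j
  induction j with
  | zero => omega
  | succ j ih =>
      intro _ hj
      by_cases hj1 : j = 0
      · subst hj1
        show max (gI nums 0) (gI nums ((0 : Nat) : Int)) = _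
        rw [seg_self]
        simp
      · have hjn : j < nums.length := by omega
        show max (pscan nums j) (gI nums ((j : Nat) : Int)) = _
        rw [ih (by omega) (by omega),
          seg_append nums 1 j (j + 1) (by omega) (by omega), seg_single nums j hjn,
          List.foldl_append, gI_nat]
        rfl

lemma rscan_eq (nums : List Int) (h : nums ≠ []) :
    ∀ (m : Nat), m ≤ nums.length - 1 →
      rscan nums m
        = (seg nums (nums.length - 1 - m) (nums.length - 1)).foldl max
            (gI nums ((nums.length : Int) - 1)) := by
  have hl : 0 < nums.length := List.length_pos_iff.mpr h
  intro m
  induction m with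
  | zero =>
      intro _
      rw [Nat.sub_zero, seg_self]
      rfl
  | succ m ih =>
      intro hm
      have hlo : nums.length - 1 - (m + 1) < nums.length - 1 - m + 1 := by omega
      show max (rscan nums m) (gI nums ((nums.length : Int) - 2 - m)) = _
      rw [ih (by omega),
        show nums.length - 1 - (m + 1) = nums.length - 2 - m by omega,
        seg_cons nums (nums.length - 2 - m) (nums.length - 1) (by omega) (by omega),
        List.foldl_cons,
        show nums.length - 2 - m + 1 = nums.length - 1 - m by omega,
        max_comm _ (nums.getD (nums.length - 2 - m) 0), foldl_max_comm, max_comm]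
      congr 1
      rw [show ((nums.length : Int) - 2 - m) = ((nums.length - 2 - m : Nat) : Int) by omega,
        gI_nat]

lemma foldl_max_map (f : Nat → Int) (l : List Nat) (h : l.map f ≠ []) (c : Int) :
    l.foldl (fun r x => max r (f x)) c = max c (maxOf (l.map f)) := by
  rw [← List.foldl_map (f := f) (g := fun (r : Int) (x : Int) => max r x) (l := l) (init := c)]
  exact foldl_max_nonempty _ h c

-- characterization of B
lemma B_eq (nums : List Int) (h : nums ≠ []) :
    maxValueOfOrderedTriplet_alt nums = refFold nums := by
  have hl : 0 < nums.length := List.length_pos_iff.mpr h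
  unfold maxValueOfOrderedTriplet_alt
  simp only []
  by_cases h3 : nums.length < 3
  · rw [if_pos h3, refFold, PySem.List.pyRange_one_eq_nil (by omega)]
    rfl
  · rw [if_neg h3]
    have hn3 : 3 ≤ nums.length := by omega
    have hgn : PySem.List.pyGetD nums ((nums.length : Int) - 1) 0
        = gI nums ((nums.length : Int) - 1) := rfl
    rw [solveB_spec nums (nums.length - 1 - 1) 1 (nums.length - 1) _ _ rfl (by omega) (by omega)]
    dsimp only
    rw [refFold, PySem.List.pyRange_one (1 : Int) ((nums.length : Int) - 1)]
    rw [show (((nums.length : Int) - 1 - 1)).toNat = nums.length - 2 by omega]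
    rw [List.foldl_map]
    rw [foldl_max_map
      (fun t : Nat => (pscan nums ((1 : Int) + t).toNat - gI nums ((1 : Int) + t)) *
        rscan nums (nums.length - 2 - ((1 : Int) + t).toNat))
      (List.range (nums.length - 2)) (by simp; omega) 0]
    congr 1
    unfold termsB
    rw [show nums.length - 1 - 1 = nums.length - 2 by omega]
    congr 1
    apply List.map_congr_left
    intro t ht
    rw [List.mem_range] at ht
    have hi1 : ((1 : Int) + t).toNat = 1 + t := by omega
    unfold termB
    rw [hi1]
    congr 1
    · congr 1
      · rw [pscan_eq nums (1 + t) (by omega) (by omega)]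
        rfl
      · rw [show ((1 : Int) + (t : Int)) = ((1 + t : Nat) : Int) by omega, gI_nat]
    · rw [rscan_eq nums h (nums.length - 2 - (1 + t)) (by omega),
        show nums.length - 1 - (nums.length - 2 - (1 + t)) = 1 + t + 1 by omega]
      rfl

-- ===== VERDICT (by name: the statement is the Claim_ definition above) =====
theorem maxValueOfOrderedTriplet_spec : Claim_equal_maxValueOfOrderedTriplet := by
  intro nums _ hpre
  show maxValueOfOrderedTriplet nums = maxValueOfOrderedTriplet_alt nums
  rw [A_eq nums hpre, B_eq nums hpre]
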